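-- pv_equiv track=rewrite | github.com/JeiKeiLim/TIL | coding_test/programmers/영어_끝말잇기.py | solution
-- ===== SOURCE A (Python) =====
-- from typing import List
--
-- def solution(n: int, words: List[str]) -> List[int]:
--     history = set([words[0]])
--
--     for i in range(1, len(words)):
--         player = (i % n) + 1
--         turn = (i // n) + 1
--
--         if words[i-1][-1] != words[i][0]:
--             return [player, turn]
--
--         if words[i] in history:
--             return [player, turn]
--
--         history.add(words[i])
--
--     return [0, 0]
-- ===== SOURCE B (Python) =====
-- def solution(n, words):
--     m = len(words)
--     # pass 1: first index whose word already occurred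
--     seen = {words[0]}
--     dup_i = None
--     for i in range(1, m):
--         if words[i] in seen:
--             dup_i = i
--             break
--         seen.add(words[i])
--     # pass 2: first adjacency break, only among indices up to the first duplicate
--     limit = m if dup_i is None else dup_i + 1
--     break_i = next((i for i in range(1, limit)
--                     if words[i - 1][-1] != words[i][0]), None)
--     candidates = [i for i in (break_i, dup_i) if i is not None]
--     if not candidates:
--         return [0, 0]
--     i = min(candidates)
--     return [(i % n) + 1, (i // n) + 1]
-- ===== Notes on version B (the rewrite author's own statement) =====
-- stated objective: alternative
-- what changed: Instead of one scan that interleaves the adjacency check, the duplicate check and the early return, B finds the first-duplicate index in one pass and the first adjacency-break index (lazily, limited to the indices A's scan reaches) in a second pass, then combines the earlier of the two into the answer.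
import Mathlib
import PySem

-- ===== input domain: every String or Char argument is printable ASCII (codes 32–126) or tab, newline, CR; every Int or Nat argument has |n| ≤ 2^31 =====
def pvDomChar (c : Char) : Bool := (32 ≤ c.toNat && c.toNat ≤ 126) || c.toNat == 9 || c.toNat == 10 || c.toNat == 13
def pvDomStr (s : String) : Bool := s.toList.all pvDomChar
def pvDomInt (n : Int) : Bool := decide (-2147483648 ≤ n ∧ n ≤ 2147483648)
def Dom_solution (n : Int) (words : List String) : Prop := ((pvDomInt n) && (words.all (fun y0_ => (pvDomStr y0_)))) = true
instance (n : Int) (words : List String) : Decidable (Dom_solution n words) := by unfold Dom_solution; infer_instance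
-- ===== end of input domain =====

-- B: instead of one scan interleaving both checks with an early return, find the first
-- duplicate index and the first adjacency-break index (limited to the indices A's scan
-- reaches) in two independent passes and keep the earlier one (objective: alternative
-- decomposition; same cost).

-- ===== PORT A =====
-- the loop 'for i in range(1, len(words))' with early returns; the first (fuel)
-- argument is the number of remaining iterations, words.length - i at the call
def solutionGo (n : Int) (words : List String) :
    Nat → PySem.Set String → Nat → List Int
  | 0, _, _ => [0, 0]
  | fuel + 1, history, i =>
    let player := PySem.Int.mod (i : Int) n + 1
    let turn := PySem.Int.floordiv (i : Int) n + 1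
    if PySem.Str.pyGet? ((PySem.List.pyGet? words ((i : Int) - 1)).getD "") (-1) ≠
        PySem.Str.pyGet? ((PySem.List.pyGet? words (i : Int)).getD "") 0 then
      [player, turn]
    else if PySem.Set.contains history ((PySem.List.pyGet? words (i : Int)).getD "") then
      [player, turn]
    else
      solutionGo n words fuel
        (PySem.Set.add history ((PySem.List.pyGet? words (i : Int)).getD "")) (i + 1)

def solution (n : Int) (words : List String) : List Int :=
  solutionGo n words (words.length - 1)
    (PySem.Set.ofList [(PySem.List.pyGet? words 0).getD ""]) 1

-- ===== PORT B =====
-- pass 1: first index (from i, for fuel steps) whose word is already in seen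
def dupGo (words : List String) : Nat → PySem.Set String → Nat → Option Nat
  | 0, _, _ => none
  | fuel + 1, seen, i =>
    if PySem.Set.contains seen ((PySem.List.pyGet? words (i : Int)).getD "") then some i
    else dupGo words fuel (PySem.Set.add seen ((PySem.List.pyGet? words (i : Int)).getD "")) (i + 1)

-- pass 2: first index (from i, for fuel steps) with words[i-1][-1] != words[i][0]
-- (the lazy 'next' over range(1, limit))
def breakGo (words : List String) : Nat → Nat → Option Nat
  | 0, _ => none
  | fuel + 1, i =>
    if PySem.Str.pyGet? ((PySem.List.pyGet? words ((i : Int) - 1)).getD "") (-1) ≠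
        PySem.Str.pyGet? ((PySem.List.pyGet? words (i : Int)).getD "") 0 then
      some i
    else breakGo words fuel (i + 1)

def failOut (n : Int) (i : Nat) : List Int :=
  [PySem.Int.mod (i : Int) n + 1, PySem.Int.floordiv (i : Int) n + 1]

-- 'min of the present candidates, [0,0] if none'
def combineIdx (n : Int) (b d : Option Nat) : List Int :=
  match b, d with
  | none, none => [0, 0]
  | some i, none => failOut n i
  | none, some j => failOut n j
  | some i, some j => failOut n (min i j)

def solution_alt (n : Int) (words : List String) : List Int :=
  let d := dupGo words (words.length - 1)
    (PySem.Set.ofList [(PySem.List.pyGet? words 0).getD ""]) 1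
  -- range(1, limit) with limit = dup_i + 1 if a duplicate exists, else len(words)
  let bFuel := match d with | none => words.length - 1 | some j => j
  combineIdx n (breakGo words bFuel 1) d

-- ===== PRECONDITION & SPEC =====
-- Pre_ excludes exactly the inputs on which the Python A raises: the empty list
-- (words[0] → IndexError), n = 0 with at least two words (ZeroDivisionError at i = 1),
-- and lists containing the empty string unless the scan stops (adjacency break or
-- duplicate) at an index strictly before the first empty word (""[−1]/""[0] → IndexError).
def Pre_solution (n : Int) (words : List String) : Prop :=
  words ≠ [] ∧
    (2 ≤ words.length →
      n ≠ 0 ∧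
        ("" ∈ words →
          ∃ i < words.findIdx (· = ""), 1 ≤ i ∧
            ((words.getD (i - 1) "").toList.getLast? ≠ (words.getD i "").toList.head? ∨
              words.getD i "" ∈ words.take i)))
instance (n : Int) (words : List String) : Decidable (Pre_solution n words) := by
  unfold Pre_solution; infer_instance
def pvWitness_solution : Int × List String := (3, ["tank", "kick", "know"])
def Spec_solution (n : Int) (words : List String) (out : List Int) : Prop := out = solution_alt n words
instance (n : Int) (words : List String) (out : List Int) : Decidable (Spec_solution n words out) := by unfold Spec_solution; infer_instance

-- ===== CLAIM (what is proved, stated in full; the proofs are below) =====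
def Claim_equal_solution : Prop := ∀ (n : Int) (words : List String), Dom_solution n words → Pre_solution n words → Spec_solution n words (solution n words)

-- ===== LEMMAS AND PROOFS =====

theorem dupGo_ge (words : List String) (fuel : Nat) :
    ∀ (seen : PySem.Set String) (i j : Nat), dupGo words fuel seen i = some j → i ≤ j := by
  induction fuel with
  | zero => intro seen i j h; exact absurd h (by simp [dupGo])
  | succ fuel ih =>
    intro seen i j h
    rw [dupGo] at h
    split at h
    · injection h with h; omega
    · have := ih _ (i + 1) j h; omega

-- the one scan of A equals the limited break scan combined with the duplicate scan,
-- for any start index, any seen set and any iteration budget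
def bFuelGen (fuel i : Nat) : Option Nat → Nat
  | none => fuel
  | some j => j - i + 1

theorem go_eq_combine (n : Int) (words : List String) (fuel : Nat) :
    ∀ (seen : PySem.Set String) (i : Nat),
      solutionGo n words fuel seen i =
        combineIdx n
          (breakGo words (bFuelGen fuel i (dupGo words fuel seen i)) i)
          (dupGo words fuel seen i) := by
  induction fuel with
  | zero => intro seen i; simp [solutionGo, dupGo, breakGo, combineIdx, bFuelGen]
  | succ fuel ih =>
    intro seen i
    rw [solutionGo, dupGo]
    by_cases hd : PySem.Set.contains seen ((PySem.List.pyGet? words (i : Int)).getD "") = true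
    · -- duplicate at i: the break scan gets exactly one step
      simp only [if_pos hd, bFuelGen]
      rw [show i - i + 1 = 1 by omega, breakGo]
      by_cases hb : PySem.Str.pyGet? ((PySem.List.pyGet? words ((i : Int) - 1)).getD "") (-1) ≠
          PySem.Str.pyGet? ((PySem.List.pyGet? words (i : Int)).getD "") 0
      · simp only [if_pos hb, combineIdx, failOut, Nat.min_self]
      · simp only [if_neg hb, breakGo, combineIdx, failOut]
    · simp only [if_neg hd]
      by_cases hb : PySem.Str.pyGet? ((PySem.List.pyGet? words ((i : Int) - 1)).getD "") (-1) ≠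
          PySem.Str.pyGet? ((PySem.List.pyGet? words (i : Int)).getD "") 0
      · -- break at i (no duplicate at i): the break scan fires on its first step
        simp only [if_pos hb]
        cases hdup : dupGo words fuel
            (PySem.Set.add seen ((PySem.List.pyGet? words (i : Int)).getD "")) (i + 1) with
        | none => simp only [bFuelGen, breakGo, if_pos hb, combineIdx, failOut]
        | some j =>
          have hij : i + 1 ≤ j := dupGo_ge words fuel _ _ _ hdup
          simp only [bFuelGen]
          rw [show j - i + 1 = (j - i - 1) + 1 + 1 by omega, breakGo]
          simp only [if_pos hb, combineIdx, failOut, Nat.min_eq_left (by omega : i ≤ j)]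
      · -- neither: both sides step to i + 1
        simp only [if_neg hb]
        rw [ih _ (i + 1)]
        congr 1
        cases hdup : dupGo words fuel
            (PySem.Set.add seen ((PySem.List.pyGet? words (i : Int)).getD "")) (i + 1) with
        | none => simp only [bFuelGen]; conv_rhs => rw [breakGo]; simp only [if_neg hb]
        | some j =>
          have hij : i + 1 ≤ j := dupGo_ge words fuel _ _ _ hdup
          simp only [bFuelGen]
          rw [show j - i + 1 = (j - (i + 1) + 1) + 1 by omega]
          conv_rhs => rw [breakGo]; simp only [if_neg hb]

-- ===== VERDICT (by name: the statement is the Claim_ definition above) =====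
theorem solution_spec : Claim_equal_solution := by
  intro n words _ _
  unfold Spec_solution solution solution_alt
  rw [go_eq_combine]
  cases hdup : dupGo words (words.length - 1)
      (PySem.Set.ofList [(PySem.List.pyGet? words 0).getD ""]) 1 with
  | none => simp only [bFuelGen]
  | some j =>
    have h1 : 1 ≤ j := dupGo_ge words _ _ _ _ hdup
    simp only [bFuelGen, show j - 1 + 1 = j by omega]
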